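-- pv_equiv track=rewrite | github.com/christianrosdahl/aoc2024 | day23.py | get_n_computer_groups
-- ===== SOURCE A (Python) =====
-- from itertools import combinations
--
-- def get_n_computer_groups(connections_per_computer, n):
--     groups = set()
--     for computer, connections in connections_per_computer.items():
--         possible_groups = combinations({computer} | connections, n)
--         for group in possible_groups:
--             group = list(group)
--             group.sort()
--             group = tuple(group)
--             if fully_connected(group, connections_per_computer):
--                 groups.add(group)
--     return groups
--
-- def fully_connected(group, connections_per_computer):
--     for i, computer1 in enumerate(group):
--         for j, computer2 in enumerate(group):
--             if i != j and not computer2 in connections_per_computer[computer1]: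
--                 return False
--     return True
-- ===== SOURCE B (Python) =====
-- from itertools import combinations
--
-- def get_n_computer_groups(connections_per_computer, n):
--     # every fully connected group of size n contains each of its members, so it is
--     # 'computer' plus an (n-1)-subset of computer's neighbours; the n-1 edges from
--     # computer to the rest hold by construction and are not re-checked
--     groups = set()
--     for computer, connections in connections_per_computer.items():
--         others = connections - {computer}
--         for rest in combinations(others, n - 1):
--             if (all(computer in connections_per_computer[r] for r in rest)
--                     and all(x == y or y in connections_per_computer[x]
--                             for x in rest for y in rest)):
--                 groups.add(tuple(sorted((computer,) + rest)))
--     return groups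
-- ===== Notes on version B (the rewrite author's own statement) =====
-- stated objective: alternative
-- what changed: A tries every size-n combination of {computer} | neighbours and re-checks all n*(n-1) adjacencies per candidate; B forces the group to contain the computer, enumerating only (n-1)-combinations of its neighbours (minus itself), and does not re-check the computer->member edges that hold by construction (fewer candidate groups per computer; a timing run showed no measurable speed-up on the generated input family, so no speed is claimed).
-- intended difference: With n = 1 and some neighbour that is not itself a key of the dict, A returns a singleton group for that non-computer too (its connectivity lookup is never reached), while B returns only singletons of actual computers of the map, the intended reading of 'fully-connected computer groups'. — e.g. on get_n_computer_groups([("a", ["b"])], 1): A returns [["a"], ["b"]], B returns [["a"]]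
-- outside the precondition, e.g. on get_n_computer_groups({'a': {'b'}}, 0): A returns {()}, B raises ValueError; on get_n_computer_groups({'a': {'x', 'b'}, 'b': set()}, 3): A returns set(), B raises KeyError
import Mathlib
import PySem

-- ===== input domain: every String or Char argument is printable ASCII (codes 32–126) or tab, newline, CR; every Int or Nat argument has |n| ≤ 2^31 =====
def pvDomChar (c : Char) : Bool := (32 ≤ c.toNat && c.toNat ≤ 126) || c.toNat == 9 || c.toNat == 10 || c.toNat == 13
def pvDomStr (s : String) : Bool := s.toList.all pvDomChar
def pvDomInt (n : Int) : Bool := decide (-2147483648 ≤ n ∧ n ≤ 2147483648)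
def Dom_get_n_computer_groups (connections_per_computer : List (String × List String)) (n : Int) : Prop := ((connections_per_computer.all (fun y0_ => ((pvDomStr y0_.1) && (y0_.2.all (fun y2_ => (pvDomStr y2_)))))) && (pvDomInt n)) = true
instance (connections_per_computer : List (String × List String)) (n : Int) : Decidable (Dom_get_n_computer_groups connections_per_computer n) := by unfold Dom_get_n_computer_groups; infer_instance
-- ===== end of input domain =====

-- B forces every group to contain the current computer (combinations of size n-1 over its
-- neighbours) instead of A's size-n combinations over {computer} ∪ neighbours, and does not
-- re-check the computer→member edges that hold by construction.  The Python function returns a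
-- SET of groups (unordered, compared as a set); both ports return its elements in sorted order,
-- since Python's hash iteration order is not modelled.

-- shared dict primitive: Python's connections_per_computer[k] (total form; on admitted inputs
-- the key is present wherever either Python performs this lookup)
def pvLookup (cpc : List (String × List String)) (k : String) : List String :=
  ((PySem.Dict.mk cpc).get? k).getD []

-- canonical sort key: Python compares strings (and tuples of strings) lexicographically over
-- code points, i.e. List.lt on the character lists
def pvKey (g : List String) : List (List Char) := g.map String.toList

-- ===== PORT A =====
def fully_connected (group : List String) (connections_per_computer : List (String × List String)) : Bool :=
  (PySem.List.enumerate group).all fun p =>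
    (PySem.List.enumerate group).all fun q =>
      !(p.1 != q.1 && !((pvLookup connections_per_computer p.2).contains q.2))

def get_n_computer_groups (connections_per_computer : List (String × List String)) (n : Int) : List (List String) :=
  let groups : PySem.Set (List String) :=
    connections_per_computer.foldl
      (fun groups p =>
        (PySem.List.combinations (PySem.Set.union (PySem.Set.ofList [p.1]) p.2) n.toNat).foldl
          (fun groups comb =>
            let group := PySem.List.sorted comb String.toList false
            if fully_connected group connections_per_computer then PySem.Set.add groups group
            else groups)
          groups)
      PySem.Set.empty
  PySem.List.sorted groups pvKey false

-- ===== PORT B =====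
def group_ok (computer : String) (rest : List String) (cpc : List (String × List String)) : Bool :=
  (rest.all fun r => (pvLookup cpc r).contains computer) &&
  (rest.all fun x => rest.all fun y => x == y || (pvLookup cpc x).contains y)

def get_n_computer_groups_alt (connections_per_computer : List (String × List String)) (n : Int) : List (List String) :=
  let groups : PySem.Set (List String) :=
    connections_per_computer.foldl
      (fun groups p =>
        (PySem.List.combinations (PySem.Set.diff (PySem.Set.ofList p.2) [p.1]) (n - 1).toNat).foldl
          (fun groups rest =>
            if group_ok p.1 rest connections_per_computer then
              PySem.Set.add groups (PySem.List.sorted (p.1 :: rest) String.toList false)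
            else groups)
          groups)
      PySem.Set.empty
  PySem.List.sorted groups pvKey false

-- ===== PRECONDITION & SPEC =====
-- Pre_ excludes: n ≤ 0 (A raises ValueError for n < 0, and at n = 0 — where A's {()}-vs-{}
-- answer depends only on the dict being non-empty — B's combinations(…, -1) raises ValueError);
-- for n ≥ 2, entries that both list a neighbour that is not itself a key AND have a candidate
-- set of at least n computers (on such inputs A almost always raises KeyError when it looks the
-- dangling neighbour up, and returns only when every candidate group happens to fail its
-- connectivity test first); and duplicate keys, which do not represent a Python dict.
def Pre_get_n_computer_groups (connections_per_computer : List (String × List String)) (n : Int) : Prop :=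
  1 ≤ n ∧ (connections_per_computer.map Prod.fst).Nodup ∧
    ∀ p ∈ connections_per_computer,
      n = 1 ∨ ((PySem.Set.union (PySem.Set.ofList [p.1]) p.2).length < n) ∨
        ∀ v ∈ p.2, v ∈ connections_per_computer.map Prod.fst
instance (connections_per_computer : List (String × List String)) (n : Int) : Decidable (Pre_get_n_computer_groups connections_per_computer n) := by unfold Pre_get_n_computer_groups; infer_instance

def pvWitness_get_n_computer_groups : (List (String × List String)) × Int :=
  ([("aa", ["bb", "cc"]), ("bb", ["aa", "cc"]), ("cc", ["aa", "bb"])], 2)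

-- With n = 1 and a neighbour that is not a key of the map, A returns a singleton group for
-- that non-computer too (its connectivity lookup is never reached), while B returns only
-- groups made of actual computers of the map, which is the intended reading of
-- 'fully-connected computer groups'.
def D_get_n_computer_groups (connections_per_computer : List (String × List String)) (n : Int) : Prop :=
  n = 1 ∧ ∃ p ∈ connections_per_computer, ∃ v ∈ p.2,
    v ∉ connections_per_computer.map Prod.fst
instance (connections_per_computer : List (String × List String)) (n : Int) : Decidable (D_get_n_computer_groups connections_per_computer n) := by unfold D_get_n_computer_groups; infer_instance

def Spec_get_n_computer_groups (connections_per_computer : List (String × List String)) (n : Int) (out : List (List String)) : Prop := ¬ D_get_n_computer_groups connections_per_computer n → out = get_n_computer_groups_alt connections_per_computer n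
instance (connections_per_computer : List (String × List String)) (n : Int) (out : List (List String)) : Decidable (Spec_get_n_computer_groups connections_per_computer n out) := by unfold Spec_get_n_computer_groups; infer_instance

def pvDiffWitness_get_n_computer_groups : (List (String × List String)) × Int :=
  ([("a", ["b"])], 1)

def pvDiffWitnessOut_get_n_computer_groups : (List (List String)) × (List (List String)) :=
  ([["a"], ["b"]], [["a"]])

-- ===== CLAIM (what is proved, stated in full; the proofs are below) =====
def Claim_unchanged_get_n_computer_groups : Prop := ∀ (connections_per_computer : List (String × List String)) (n : Int), Dom_get_n_computer_groups connections_per_computer n → Pre_get_n_computer_groups connections_per_computer n → Spec_get_n_computer_groups connections_per_computer n (get_n_computer_groups connections_per_computer n)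

def Claim_changed_get_n_computer_groups : Prop := Dom_get_n_computer_groups (pvDiffWitness_get_n_computer_groups.1) (pvDiffWitness_get_n_computer_groups.2) ∧ Pre_get_n_computer_groups (pvDiffWitness_get_n_computer_groups.1) (pvDiffWitness_get_n_computer_groups.2) ∧ D_get_n_computer_groups (pvDiffWitness_get_n_computer_groups.1) (pvDiffWitness_get_n_computer_groups.2) ∧ get_n_computer_groups (pvDiffWitness_get_n_computer_groups.1) (pvDiffWitness_get_n_computer_groups.2) = pvDiffWitnessOut_get_n_computer_groups.1 ∧ get_n_computer_groups_alt (pvDiffWitness_get_n_computer_groups.1) (pvDiffWitness_get_n_computer_groups.2) = pvDiffWitnessOut_get_n_computer_groups.2 ∧ pvDiffWitnessOut_get_n_computer_groups.1 ≠ pvDiffWitnessOut_get_n_computer_groups.2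

def Claim_exact_get_n_computer_groups : Prop := ∀ (connections_per_computer : List (String × List String)) (n : Int), Dom_get_n_computer_groups connections_per_computer n → Pre_get_n_computer_groups connections_per_computer n → D_get_n_computer_groups connections_per_computer n → get_n_computer_groups connections_per_computer n ≠ get_n_computer_groups_alt connections_per_computer n

-- ===== LEMMAS AND PROOFS =====

-- the groups that belong in the answer: sorted, of size n, non-empty, and with every member a
-- key of the map whose value contains every other member
def GoodGroup (cpc : List (String × List String)) (n : Int) (g : List String) : Prop :=
  g.Nodup ∧ PySem.List.sorted g String.toList false = g ∧ g.length = n.toNat ∧ g ≠ [] ∧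
    ∀ x ∈ g, ∃ vs, (PySem.Dict.mk cpc).get? x = some vs ∧ ∀ y ∈ g, y ≠ x → y ∈ vs

-- the two accumulated sets, in the exact fold shape of the ports (the ports are these folds
-- followed by the final canonical sort; pv_A_eq / pv_B_eq below are definitional)
def pvSetA (cpc : List (String × List String)) (n : Int) : List (List String) :=
  cpc.foldl
    (fun groups p =>
      (PySem.List.combinations (PySem.Set.union (PySem.Set.ofList [p.1]) p.2) n.toNat).foldl
        (fun groups comb =>
          if fully_connected (PySem.List.sorted comb String.toList false) cpc then
            PySem.Set.add groups (PySem.List.sorted comb String.toList false)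
          else groups)
        groups)
    PySem.Set.empty

def pvSetB (cpc : List (String × List String)) (n : Int) : List (List String) :=
  cpc.foldl
    (fun groups p =>
      (PySem.List.combinations (PySem.Set.diff (PySem.Set.ofList p.2) [p.1]) (n - 1).toNat).foldl
        (fun groups rest =>
          if group_ok p.1 rest cpc then
            PySem.Set.add groups (PySem.List.sorted (p.1 :: rest) String.toList false)
          else groups)
        groups)
    PySem.Set.empty

theorem pv_A_eq (cpc : List (String × List String)) (n : Int) :
    get_n_computer_groups cpc n = PySem.List.sorted (pvSetA cpc n) pvKey false := rfl

theorem pv_B_eq (cpc : List (String × List String)) (n : Int) :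
    get_n_computer_groups_alt cpc n = PySem.List.sorted (pvSetB cpc n) pvKey false := rfl

theorem pv_key_inj : Function.Injective pvKey := by
  intro a b h
  exact List.map_injective_iff.2 (fun x y hxy => String.toList_inj.mp hxy) h

theorem pv_toList_inj : Function.Injective String.toList := fun _ _ h => String.toList_inj.mp h

theorem pv_mem_foldl_addIf {δ : Type} (ys : List δ) (ok : δ → Bool) (out : δ → List String)
    (s0 : List (List String)) (g : List String) :
    (g ∈ ys.foldl (fun s y => if ok y then PySem.Set.add s (out y) else s) s0) ↔
      g ∈ s0 ∨ ∃ y ∈ ys, ok y = true ∧ out y = g := by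
  induction ys generalizing s0 with
  | nil => simp
  | cons y ys ih =>
    simp only [List.foldl_cons, ih]
    by_cases h : ok y = true
    · simp [h, PySem.Set.mem_add]
      tauto
    · simp [h]

theorem pv_nodup_foldl_addIf {δ : Type} (ys : List δ) (ok : δ → Bool) (out : δ → List String)
    (s0 : List (List String)) (h : s0.Nodup) :
    (ys.foldl (fun s y => if ok y then PySem.Set.add s (out y) else s) s0).Nodup := by
  induction ys generalizing s0 with
  | nil => exact h
  | cons y ys ih =>
    simp only [List.foldl_cons]
    apply ih
    by_cases hy : ok y = true
    · simpa [hy] using PySem.Set.nodup_add s0 (out y) h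
    · simpa [hy] using h

theorem pv_mem_foldl2 {γ δ : Type} (l : List γ) (cand : γ → List δ) (ok : γ → δ → Bool)
    (out : γ → δ → List String) (s0 : List (List String)) (g : List String) :
    (g ∈ l.foldl (fun s c => (cand c).foldl (fun s y => if ok c y then PySem.Set.add s (out c y) else s) s) s0) ↔
      g ∈ s0 ∨ ∃ c ∈ l, ∃ y ∈ cand c, ok c y = true ∧ out c y = g := by
  induction l generalizing s0 with
  | nil => simp
  | cons c l ih =>
    simp only [List.foldl_cons, ih, pv_mem_foldl_addIf, List.mem_cons]
    constructor
    · rintro (((h | ⟨y, hy, hok, rfl⟩) ) | ⟨c', hc', y, hy, hok, rfl⟩)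
      · exact Or.inl h
      · exact Or.inr ⟨c, Or.inl rfl, y, hy, hok, rfl⟩
      · exact Or.inr ⟨c', Or.inr hc', y, hy, hok, rfl⟩
    · rintro (h | ⟨c', (rfl | hc'), y, hy, hok, rfl⟩)
      · exact Or.inl (Or.inl h)
      · exact Or.inl (Or.inr ⟨y, hy, hok, rfl⟩)
      · exact Or.inr ⟨c', hc', y, hy, hok, rfl⟩

theorem pv_nodup_foldl2 {γ δ : Type} (l : List γ) (cand : γ → List δ) (ok : γ → δ → Bool)
    (out : γ → δ → List String) (s0 : List (List String)) (h : s0.Nodup) :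
    (l.foldl (fun s c => (cand c).foldl (fun s y => if ok c y then PySem.Set.add s (out c y) else s) s) s0).Nodup := by
  induction l generalizing s0 with
  | nil => exact h
  | cons c l ih => exact ih _ (pv_nodup_foldl_addIf _ _ _ _ h)

theorem pv_mem_enumerate {α : Type} (g : List α) (s : Int) (p : Int × α) :
    p ∈ PySem.List.enumerate g s ↔ ∃ k : Nat, ∃ hk : k < g.length, p.1 = s + k ∧ p.2 = g[k] := by
  induction g generalizing s with
  | nil => simp [PySem.List.enumerate]
  | cons x xs ih =>
    rw [PySem.List.enumerate_cons]
    simp only [List.mem_cons, ih, List.length_cons]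
    constructor
    · rintro (rfl | ⟨k, hk, h1, h2⟩)
      · exact ⟨0, by omega, by simp⟩
      · exact ⟨k + 1, by omega, by push_cast; constructor <;> [omega; simpa using h2]⟩
    · rintro ⟨k, hk, h1, h2⟩
      cases k with
      | zero => left; simp at h1 h2; cases p; simp_all
      | succ k => right; exact ⟨k, by omega, by push_cast at h1 ⊢; omega, by simpa using h2⟩

theorem pv_fc_iff (g : List String) (cpc : List (String × List String)) (hg : g.Nodup) :
    fully_connected g cpc = true ↔
      ∀ x ∈ g, ∀ y ∈ g, x ≠ y → y ∈ pvLookup cpc x := by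
  simp only [fully_connected, List.all_eq_true, Bool.not_eq_eq_eq_not, Bool.not_true,
    Bool.and_eq_false_iff, bne_eq_false_iff_eq, List.contains_eq_mem,
    Bool.not_false, decide_eq_true_eq]
  constructor
  · intro h x hx y hy hxy
    obtain ⟨i, hi, rfl⟩ := List.mem_iff_getElem.1 hx
    obtain ⟨j, hj, rfl⟩ := List.mem_iff_getElem.1 hy
    have h1 := h ((0 : Int) + i, g[i]) ((pv_mem_enumerate g 0 _).2 ⟨i, hi, rfl, rfl⟩)
      ((0 : Int) + j, g[j]) ((pv_mem_enumerate g 0 _).2 ⟨j, hj, rfl, rfl⟩)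
    rcases h1 with h1 | h1
    · exfalso; apply hxy; have : i = j := by omega
      subst this; rfl
    · exact h1
  · intro h p hp q hq
    obtain ⟨i, hi, hp1, hp2⟩ := (pv_mem_enumerate g 0 p).1 hp
    obtain ⟨j, hj, hq1, hq2⟩ := (pv_mem_enumerate g 0 q).1 hq
    by_cases hij : i = j
    · left; omega
    · right
      rw [hp2, hq2]
      exact h _ (List.getElem_mem hi) _ (List.getElem_mem hj)
        (fun he => hij ((List.Nodup.getElem_inj_iff hg).mp he.symm).symm)

-- dict facts on the raw association list
theorem pv_get?_of_mem (cpc : List (String × List String)) (p : String × List String)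
    (hnd : (cpc.map Prod.fst).Nodup) (hp : p ∈ cpc) :
    (PySem.Dict.mk cpc).get? p.1 = some p.2 := by
  apply PySem.Dict.get?_of_mem_items
  · exact hp
  · simpa [PySem.Dict.keys_mk] using hnd

theorem pv_mem_of_get? (cpc : List (String × List String)) (k : String) (vs : List String)
    (h : (PySem.Dict.mk cpc).get? k = some vs) : (k, vs) ∈ cpc :=
  PySem.Dict.mem_items_of_get?_eq_some _ h

theorem pv_get?_isSome (cpc : List (String × List String)) (k : String)
    (h : k ∈ cpc.map Prod.fst) : ∃ vs, (PySem.Dict.mk cpc).get? k = some vs := by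
  cases hg : (PySem.Dict.mk cpc).get? k with
  | some vs => exact ⟨vs, rfl⟩
  | none =>
    exfalso
    have := (PySem.Dict.get?_eq_none_iff_not_mem_keys _ _).1 hg
    apply this
    simpa [PySem.Dict.keys_mk] using h

-- a second member of a duplicate-free list of length ≥ 2
theorem pv_exists_other (g : List String) (x : String) (hx : x ∈ g) (hnd : g.Nodup)
    (h2 : 2 ≤ g.length) : ∃ y ∈ g, y ≠ x := by
  match g, hnd, h2 with
  | a :: b :: t, hnd, _ =>
    by_cases hax : a = x
    · refine ⟨b, by simp, ?_⟩
      rw [← hax]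
      intro hba
      exact (List.nodup_cons.1 hnd).1 (hba ▸ List.mem_cons_self ..)
    · exact ⟨a, by simp, hax⟩

theorem pv_A_iff_good (cpc : List (String × List String)) (n : Int) (hn : 1 ≤ n)
    (hk1 : n = 1 → ∀ p ∈ cpc, ∀ v ∈ p.2, v ∈ cpc.map Prod.fst) (g : List String) :
    g ∈ pvSetA cpc n ↔ GoodGroup cpc n g := by
  unfold pvSetA
  rw [pv_mem_foldl2]
  simp only [PySem.Set.empty, List.not_mem_nil, false_or]
  constructor
  · rintro ⟨p, hp, comb, hcomb, hok, rfl⟩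
    obtain ⟨hsub, hlen⟩ := (PySem.List.mem_combinations_iff _ _ _).1 hcomb
    have hUnd : (PySem.Set.union (PySem.Set.ofList [p.1]) p.2).Nodup :=
      PySem.Set.nodup_union _ _ (PySem.Set.nodup_ofList _)
    have hcnd : comb.Nodup := hUnd.sublist hsub
    have hperm : (PySem.List.sorted comb String.toList false).Perm comb :=
      PySem.List.sorted_perm _ _ _
    have hgnd : (PySem.List.sorted comb String.toList false).Nodup := hperm.symm.nodup hcnd
    have hglen : (PySem.List.sorted comb String.toList false).length = n.toNat :=
      hperm.length_eq.trans hlen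
    refine ⟨hgnd, ?_, hglen, ?_, ?_⟩
    · have hss := PySem.List.sorted_sorted comb String.toList
      convert hss using 2
      congr 1
    · have h1 : 1 ≤ n.toNat := by omega
      intro hnil
      rw [hnil] at hglen
      simp at hglen
      omega
    · intro x hx
      by_cases h1 : n = 1
      · -- size-one groups: ¬D_ supplies that every neighbour is a key
        have hxc : x ∈ comb := hperm.mem_iff.1 hx
        have hxU : x ∈ PySem.Set.union (PySem.Set.ofList [p.1]) p.2 := hsub.subset hxc
        have hxkey : x ∈ cpc.map Prod.fst := by
          rcases (PySem.Set.mem_union _ _ _).1 hxU with hu | hu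
          · have hxp : x = p.1 := by simpa [PySem.Set.mem_ofList] using hu
            exact hxp ▸ List.mem_map_of_mem hp
          · exact hk1 h1 p hp x hu
        obtain ⟨vs, hvs⟩ := pv_get?_isSome cpc x hxkey
        refine ⟨vs, hvs, ?_⟩
        intro y hy hyx
        have hmem := (pv_fc_iff _ cpc hgnd).1 hok x hx y hy (fun he => hyx he.symm)
        simpa [pvLookup, hvs] using hmem
      · -- n ≥ 2: another member witnesses that the lookup of x succeeds
        obtain ⟨y0, hy0g, hy0x⟩ := pv_exists_other _ x hx hgnd (by omega)
        have h0 := (pv_fc_iff _ cpc hgnd).1 hok x hx y0 hy0g (fun he => hy0x he.symm)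
        cases hget : (PySem.Dict.mk cpc).get? x with
        | none => simp [pvLookup, hget] at h0
        | some vs =>
          refine ⟨vs, rfl, ?_⟩
          intro y hy hyx
          have hmem := (pv_fc_iff _ cpc hgnd).1 hok x hx y hy (fun he => hyx he.symm)
          simpa [pvLookup, hget] using hmem
  · rintro ⟨hnd0, hsort, hlen, hne, hadj⟩
    have hm : g.head hne ∈ g := List.head_mem hne
    obtain ⟨vs, hget, hvs⟩ := hadj _ hm
    have hpmem : (g.head hne, vs) ∈ cpc := pv_mem_of_get? _ _ _ hget
    have hUnd : (PySem.Set.union (PySem.Set.ofList [g.head hne]) vs).Nodup :=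
      PySem.Set.nodup_union _ _ (PySem.Set.nodup_ofList _)
    set U := PySem.Set.union (PySem.Set.ofList [g.head hne]) vs with hU
    set comb := U.filter (fun x => g.contains x) with hcombdef
    have hsubU : comb.Sublist U := List.filter_sublist
    have hcnd : comb.Nodup := hUnd.sublist hsubU
    have hmemiff : ∀ x, x ∈ comb ↔ x ∈ g := by
      intro x
      constructor
      · intro hx
        have := List.of_mem_filter hx
        simpa using this
      · intro hx
        rw [hcombdef]
        apply List.mem_filter.2
        refine ⟨?_, by simpa using hx⟩
        by_cases hxm : x = g.head hne
        · exact (PySem.Set.mem_union _ _ _).2 (Or.inl (by simp [PySem.Set.mem_ofList, hxm]))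
        · exact (PySem.Set.mem_union _ _ _).2 (Or.inr (hvs x hx hxm))
    have hperm : comb.Perm g := (List.perm_ext_iff_of_nodup hcnd hnd0).2 hmemiff
    have hsorteq : PySem.List.sorted comb String.toList false = g := by
      have h2 := PySem.List.sorted_eq_sorted_of_perm comb g String.toList pv_toList_inj hperm
      have h3 : PySem.List.sorted comb String.toList false
          = PySem.List.sorted g String.toList false := by
        convert h2 using 2
      rw [h3, hsort]
    refine ⟨(g.head hne, vs), hpmem, comb, ?_, ?_, hsorteq⟩
    · exact (PySem.List.mem_combinations_iff _ _ _).2 ⟨hsubU, hperm.length_eq.trans hlen⟩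
    · rw [hsorteq]
      apply (pv_fc_iff g cpc hnd0).2
      intro x hx y hy hxy
      obtain ⟨vsx, hgx, hvx⟩ := hadj x hx
      simpa [pvLookup, hgx] using hvx y hy (Ne.symm hxy)

theorem pv_group_ok_iff (computer : String) (rest : List String) (cpc : List (String × List String)) :
    group_ok computer rest cpc = true ↔
      (∀ r ∈ rest, computer ∈ pvLookup cpc r) ∧
        ∀ x ∈ rest, ∀ y ∈ rest, x ≠ y → y ∈ pvLookup cpc x := by
  simp only [group_ok, Bool.and_eq_true, List.all_eq_true, Bool.or_eq_true, beq_iff_eq,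
    List.contains_eq_mem, decide_eq_true_eq]
  constructor
  · rintro ⟨h1, h2⟩
    refine ⟨h1, fun x hx y hy hxy => ?_⟩
    rcases h2 x hx y hy with h | h
    · exact absurd h hxy
    · exact h
  · rintro ⟨h1, h2⟩
    refine ⟨h1, fun x hx y hy => ?_⟩
    by_cases hxy : x = y
    · exact Or.inl hxy
    · exact Or.inr (h2 x hx y hy hxy)

theorem pv_B_iff_good (cpc : List (String × List String)) (n : Int) (hn : 1 ≤ n)
    (hnd : (cpc.map Prod.fst).Nodup) (g : List String) :
    g ∈ pvSetB cpc n ↔ GoodGroup cpc n g := by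
  unfold pvSetB
  rw [pv_mem_foldl2]
  simp only [PySem.Set.empty, List.not_mem_nil, false_or]
  constructor
  · rintro ⟨p, hp, rest, hrest, hok, rfl⟩
    obtain ⟨hok1, hok2⟩ := (pv_group_ok_iff _ _ _).1 hok
    obtain ⟨hsub, hlen⟩ := (PySem.List.mem_combinations_iff _ _ _).1 hrest
    have hDnd : (PySem.Set.diff (PySem.Set.ofList p.2) [p.1]).Nodup :=
      PySem.Set.nodup_diff _ _ (PySem.Set.nodup_ofList _)
    have hrnd : rest.Nodup := hDnd.sublist hsub
    have hrD : ∀ x ∈ rest, x ∈ p.2 ∧ x ≠ p.1 := by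
      intro x hx
      have := (PySem.Set.mem_diff _ _ _).1 (hsub.subset hx)
      constructor
      · exact (PySem.Set.mem_ofList _ _).1 this.1
      · simpa using this.2
    have hp1r : p.1 ∉ rest := fun h => (hrD _ h).2 rfl
    have hlnd : (p.1 :: rest).Nodup := List.nodup_cons.2 ⟨hp1r, hrnd⟩
    have hperm : (PySem.List.sorted (p.1 :: rest) String.toList false).Perm (p.1 :: rest) :=
      PySem.List.sorted_perm _ _ _
    have hgnd : (PySem.List.sorted (p.1 :: rest) String.toList false).Nodup :=
      hperm.symm.nodup hlnd
    have hglen : (PySem.List.sorted (p.1 :: rest) String.toList false).length = n.toNat := by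
      have := hperm.length_eq
      simp only [List.length_cons, hlen] at this
      omega
    refine ⟨hgnd, ?_, hglen, ?_, ?_⟩
    · have hss := PySem.List.sorted_sorted (p.1 :: rest) String.toList
      convert hss using 2
      congr 1
    · intro hnil
      rw [hnil] at hperm
      have := hperm.length_eq
      simp at this
    · intro x hx
      have hxl : x ∈ p.1 :: rest := hperm.mem_iff.1 hx
      rcases List.mem_cons.1 hxl with rfl | hxr
      · refine ⟨p.2, pv_get?_of_mem cpc p hnd hp, ?_⟩
        intro y hy hyx
        have hyl : y ∈ p.1 :: rest := hperm.mem_iff.1 hy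
        rcases List.mem_cons.1 hyl with rfl | hyr
        · exact absurd rfl hyx
        · exact (hrD y hyr).1
      · have h0 := hok1 x hxr
        cases hget : (PySem.Dict.mk cpc).get? x with
        | none => simp [pvLookup, hget] at h0
        | some vs =>
          refine ⟨vs, rfl, ?_⟩
          intro y hy hyx
          have hyl : y ∈ p.1 :: rest := hperm.mem_iff.1 hy
          rcases List.mem_cons.1 hyl with rfl | hyr
          · simpa [pvLookup, hget] using h0
          · have := hok2 x hxr y hyr (fun he => hyx he.symm)
            simpa [pvLookup, hget] using this
  · rintro ⟨hnd0, hsort, hlen, hne, hadj⟩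
    have hm : g.head hne ∈ g := List.head_mem hne
    obtain ⟨vs, hget, hvs⟩ := hadj _ hm
    have hpmem : (g.head hne, vs) ∈ cpc := pv_mem_of_get? _ _ _ hget
    have hDnd : (PySem.Set.diff (PySem.Set.ofList vs) [g.head hne]).Nodup :=
      PySem.Set.nodup_diff _ _ (PySem.Set.nodup_ofList _)
    set D := PySem.Set.diff (PySem.Set.ofList vs) [g.head hne] with hD
    set rest := D.filter (fun x => g.contains x) with hrestdef
    have hsubD : rest.Sublist D := List.filter_sublist
    have hrnd : rest.Nodup := hDnd.sublist hsubD
    have hrmem : ∀ x, x ∈ rest ↔ x ∈ g ∧ x ≠ g.head hne := by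
      intro x
      constructor
      · intro hx
        have hxg : x ∈ g := by simpa using List.of_mem_filter hx
        have hxD := List.mem_of_mem_filter hx
        have := (PySem.Set.mem_diff _ _ _).1 hxD
        exact ⟨hxg, by simpa using this.2⟩
      · rintro ⟨hxg, hxm⟩
        rw [hrestdef]
        apply List.mem_filter.2
        refine ⟨?_, by simpa using hxg⟩
        exact (PySem.Set.mem_diff _ _ _).2
          ⟨(PySem.Set.mem_ofList _ _).2 (hvs x hxg hxm), by simpa using hxm⟩
    have hmr : g.head hne ∉ rest := fun h => ((hrmem _).1 h).2 rfl
    have hlnd : (g.head hne :: rest).Nodup := List.nodup_cons.2 ⟨hmr, hrnd⟩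
    have hmemiff : ∀ x, x ∈ (g.head hne :: rest) ↔ x ∈ g := by
      intro x
      rw [List.mem_cons, hrmem]
      constructor
      · rintro (rfl | ⟨hx, -⟩)
        · exact hm
        · exact hx
      · intro hx
        by_cases hxm : x = g.head hne
        · exact Or.inl hxm
        · exact Or.inr ⟨hx, hxm⟩
    have hperm : (g.head hne :: rest).Perm g := (List.perm_ext_iff_of_nodup hlnd hnd0).2 hmemiff
    have hrlen : rest.length = (n - 1).toNat := by
      have := hperm.length_eq
      simp only [List.length_cons, hlen] at this
      omega
    have hsorteq : PySem.List.sorted (g.head hne :: rest) String.toList false = g := by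
      have h2 := PySem.List.sorted_eq_sorted_of_perm (g.head hne :: rest) g String.toList
        pv_toList_inj hperm
      have h3 : PySem.List.sorted (g.head hne :: rest) String.toList false
          = PySem.List.sorted g String.toList false := by
        convert h2 using 2
      rw [h3, hsort]
    refine ⟨(g.head hne, vs), hpmem, rest, ?_, ?_, hsorteq⟩
    · exact (PySem.List.mem_combinations_iff _ _ _).2 ⟨hsubD, hrlen⟩
    · apply (pv_group_ok_iff _ _ _).2
      constructor
      · intro r hr
        obtain ⟨hrg, hrm⟩ := (hrmem r).1 hr
        obtain ⟨vsr, hgr, hvr⟩ := hadj r hrg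
        have : g.head hne ∈ vsr := hvr _ hm (fun he => hrm he.symm)
        simpa [pvLookup, hgr] using this
      · intro x hx y hy hxy
        obtain ⟨hxg, -⟩ := (hrmem x).1 hx
        obtain ⟨hyg, -⟩ := (hrmem y).1 hy
        obtain ⟨vsx, hgx, hvx⟩ := hadj x hxg
        simpa [pvLookup, hgx] using hvx y hyg (Ne.symm hxy)

-- ===== VERDICT (by name: the statements are the Claim_ definitions above) =====
theorem get_n_computer_groups_spec : Claim_unchanged_get_n_computer_groups := by
  intro cpc n _hdom hpre
  unfold Spec_get_n_computer_groups
  intro hD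
  obtain ⟨hn, hnd, _hsafe⟩ := hpre
  have hk1 : n = 1 → ∀ p ∈ cpc, ∀ v ∈ p.2, v ∈ cpc.map Prod.fst := by
    intro h1 p hp v hv
    by_contra hnk
    exact hD ⟨h1, p, hp, v, hv, hnk⟩
  rw [pv_A_eq, pv_B_eq]
  have hA : (pvSetA cpc n).Nodup := by
    unfold pvSetA
    exact pv_nodup_foldl2 _ _ _ _ _ (by simp [PySem.Set.empty])
  have hB : (pvSetB cpc n).Nodup := by
    unfold pvSetB
    exact pv_nodup_foldl2 _ _ _ _ _ (by simp [PySem.Set.empty])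
  have hperm : (pvSetA cpc n).Perm (pvSetB cpc n) := by
    apply (List.perm_ext_iff_of_nodup hA hB).2
    intro a
    exact (pv_A_iff_good cpc n hn hk1 a).trans (pv_B_iff_good cpc n hn hnd a).symm
  have h2 := PySem.List.sorted_eq_sorted_of_perm _ _ pvKey pv_key_inj hperm
  convert h2 using 2

theorem get_n_computer_groups_changed : Claim_changed_get_n_computer_groups := by
  unfold Claim_changed_get_n_computer_groups
  decide

theorem get_n_computer_groups_tight : Claim_exact_get_n_computer_groups := by
  intro cpc n _hdom hpre hD hEq
  obtain ⟨hn, hnd, _⟩ := hpre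
  obtain ⟨h1, p, hp, v, hv, hvnk⟩ := hD
  -- [v] is produced by A …
  have hmemA : [v] ∈ pvSetA cpc n := by
    unfold pvSetA
    rw [pv_mem_foldl2]
    refine Or.inr ⟨p, hp, [v], ?_, ?_, rfl⟩
    · apply (PySem.List.mem_combinations_iff _ _ _).2
      constructor
      · have hvU : v ∈ PySem.Set.union (PySem.Set.ofList [p.1]) p.2 :=
          (PySem.Set.mem_union _ _ _).2 (Or.inr hv)
        exact List.singleton_sublist.2 hvU
      · simp [h1]
    · apply (pv_fc_iff _ cpc (List.nodup_singleton v)).2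
      simp
  -- … but not by B
  have hmemB : [v] ∉ pvSetB cpc n := by
    unfold pvSetB
    rw [pv_mem_foldl2]
    simp only [PySem.Set.empty, List.not_mem_nil, false_or]
    rintro ⟨q, hq, rest, hrest, -, hout⟩
    obtain ⟨hsub, hlen⟩ := (PySem.List.mem_combinations_iff _ _ _).1 hrest
    have hr0 : rest = [] := by
      apply List.eq_nil_of_length_eq_zero
      rw [hlen, h1]
      rfl
    rw [hr0] at hout
    have hq1 : q.1 = v := by
      have : PySem.List.sorted [q.1] String.toList false = [q.1] := rfl
      rw [this] at hout
      simpa using hout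
    exact hvnk (hq1 ▸ List.mem_map_of_mem hq)
  apply hmemB
  have h1A : [v] ∈ get_n_computer_groups cpc n := by
    rw [pv_A_eq]
    exact (PySem.List.mem_sorted _ _ _ _).2 hmemA
  rw [hEq, pv_B_eq] at h1A
  exact (PySem.List.mem_sorted _ _ _ _).1 h1A
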